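-- pv_equiv track=rewrite | github.com/ali-john/Leetcode-solutions | my-folder/4013-merge-close-characters/solution.py | mergeCharacters
-- ===== SOURCE A (Python) =====
-- def mergeCharacters(s: str, k: int) -> str:
--     s = list(s)
--     i = 0
--
--     while i < len(s):
--         curr = s[i]
--         for j in range(i+1, min(i+k+1, len(s))):
--             if s[j] == curr:
--                 s.pop(j)
--                 i= -1
--                 break
--         i+=1
--     return ''.join(s)
-- ===== SOURCE B (Python) =====
-- def mergeCharacters(s: str, k: int) -> str:
--     res = []
--     for c in s:
--         if c not in res[max(len(res) - k, 0):]: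
--             res.append(c)
--     return ''.join(res)
-- ===== Notes on version B (the rewrite author's own statement) =====
-- stated objective: faster
-- what changed: Replaces A's pop-and-restart-from-index-0 repeated scanning with a single left-to-right pass that keeps a character only if it does not occur among the last k kept characters.
import Mathlib
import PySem

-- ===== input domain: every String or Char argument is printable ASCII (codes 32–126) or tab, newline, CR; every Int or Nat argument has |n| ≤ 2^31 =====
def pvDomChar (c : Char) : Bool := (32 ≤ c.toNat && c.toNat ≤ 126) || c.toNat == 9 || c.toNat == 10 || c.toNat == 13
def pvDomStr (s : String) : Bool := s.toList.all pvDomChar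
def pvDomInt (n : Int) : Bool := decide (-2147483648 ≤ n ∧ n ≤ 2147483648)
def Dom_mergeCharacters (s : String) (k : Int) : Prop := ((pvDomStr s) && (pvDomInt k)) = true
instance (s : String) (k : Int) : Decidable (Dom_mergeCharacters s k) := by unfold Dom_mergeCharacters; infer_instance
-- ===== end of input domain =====

-- B replaces A's pop-and-restart-from-scratch loop by a single left-to-right pass that
-- keeps a character only if it does not occur among the last k kept characters (objective: faster).

-- ===== PORT A =====
-- the inner `for j in range(i+1, min(i+k+1, len(s)))` loop: first j with s[j] == curr (some j = break at j)
def scanJ (s : List Char) (c : Char) : List Int → Option Int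
  | [] => none
  | j :: rest => if s[j.toNat]? = some c then some j else scanJ s c rest

-- needed by aLoop's termination proof: the found index came from the scanned range
theorem scanJ_mem (s : List Char) (c : Char) (js : List Int) (j : Int)
    (h : scanJ s c js = some j) : j ∈ js := by
  induction js with
  | nil => simp [scanJ] at h
  | cons x rest ih =>
    rw [scanJ] at h
    split at h
    · cases h; exact List.mem_cons_self
    · exact List.mem_cons_of_mem x (ih h)

-- the `while i < len(s)` loop; `s.pop(j); i = -1; break; i += 1` = erase index j, restart at i = 0
def aLoop (k : Int) (s : List Char) (i : Nat) : List Char :=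
  if h : i < s.length then
    match hf : scanJ s s[i] (PySem.List.pyRange ((i : Int) + 1) (min ((i : Int) + k + 1) (s.length : Int)) 1) with
    | some j => aLoop k (s.eraseIdx j.toNat) 0
    | none => aLoop k s (i + 1)
  else s
termination_by (s.length, s.length - i)
decreasing_by
  · have hj := scanJ_mem _ _ _ _ hf
    rw [PySem.List.mem_pyRange_one] at hj
    have hlt : j.toNat < s.length := by omega
    simp [List.length_eraseIdx, hlt]
    omega
  · right; omega

def mergeCharacters (s : String) (k : Int) : String :=
  String.ofList (aLoop k s.toList 0)

-- ===== PORT B =====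
-- `if c not in res[max(len(res)-k, 0):]: res.append(c)`
def bStep (k : Int) (res : List Char) (c : Char) : List Char :=
  if c ∈ res.drop (res.length - k.toNat) then res else res ++ [c]

def mergeCharacters_alt (s : String) (k : Int) : String :=
  String.ofList (s.toList.foldl (bStep k) [])

-- ===== PRECONDITION & SPEC =====
def Spec_mergeCharacters (s : String) (k : Int) (out : String) : Prop := out = mergeCharacters_alt s k
instance (s : String) (k : Int) (out : String) : Decidable (Spec_mergeCharacters s k out) := by unfold Spec_mergeCharacters; infer_instance

-- ===== CLAIM (what is proved, stated in full; the proofs are below) =====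
def Claim_equal_mergeCharacters : Prop := ∀ (s : String) (k : Int), Dom_mergeCharacters s k → Spec_mergeCharacters s k (mergeCharacters s k)

-- ===== LEMMAS AND PROOFS =====

-- positions q < i have no equal character within distance k to their right
def Clean (k : Int) (s : List Char) (i : Nat) : Prop :=
  ∀ q j : Nat, q < i → q < j → (j : Int) < min ((q : Int) + k + 1) (s.length : Int) →
    s[j]? ≠ s[q]?

theorem scanJ_some_spec (s : List Char) (c : Char) (js : List Int) (j : Int)
    (h : scanJ s c js = some j) : s[j.toNat]? = some c := by
  induction js with
  | nil => simp [scanJ] at h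
  | cons x rest ih =>
    rw [scanJ] at h
    split at h
    · cases h; assumption
    · exact ih h

theorem scanJ_none_spec (s : List Char) (c : Char) (js : List Int)
    (h : scanJ s c js = none) : ∀ x ∈ js, s[x.toNat]? ≠ some c := by
  induction js with
  | nil => simp
  | cons x rest ih =>
    rw [scanJ] at h
    split at h
    · simp at h
    · intro y hy
      rcases List.mem_cons.mp hy with rfl | hy'
      · assumption
      · exact ih h y hy'

-- B's fold only ever appends to its accumulator
theorem foldl_bStep_prefix (k : Int) (l res : List Char) :
    ∃ e : List Char, l.foldl (bStep k) res = res ++ e ∧ e.length ≤ l.length := by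
  induction l generalizing res with
  | nil => exact ⟨[], by simp⟩
  | cons c l ih =>
    simp only [List.foldl_cons]
    unfold bStep
    split
    · obtain ⟨e, he, hl⟩ := ih res
      exact ⟨e, he, by simpa using Nat.le_succ_of_le hl⟩
    · obtain ⟨e, he, hl⟩ := ih (res ++ [c])
      exact ⟨c :: e, by simpa using he, by simpa using hl⟩

-- on a clean prefix, B's fold keeps every character
theorem foldl_bStep_clean (k : Int) (s : List Char) (i : Nat) (hc : Clean k s i) :
    ∀ p : Nat, p ≤ i + 1 → (s.take p).foldl (bStep k) [] = s.take p := by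
  intro p
  induction p with
  | zero => simp
  | succ p ih =>
    intro hp
    by_cases hplen : p < s.length
    · have htake : s.take (p + 1) = s.take p ++ [s[p]] := by
        rw [List.take_add_one, List.getElem?_eq_getElem hplen]; rfl
      rw [htake, List.foldl_append, ih (by omega), List.foldl_cons, List.foldl_nil]
      unfold bStep
      rw [if_neg]
      intro hmem
      have hlen : (s.take p).length = p := by simp; omega
      obtain ⟨t, ht, hget⟩ := List.mem_iff_getElem.mp hmem
      rw [List.getElem_drop] at hget
      have htp : (s.take p).length - k.toNat + t < p := by
        rw [List.length_drop, hlen] at ht; omega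
      rw [List.getElem_take] at hget
      set q := (s.take p).length - k.toNat + t with hq
      have h1 : q < i := by omega
      have h2 : q < p := htp
      have h3 : (p : Int) < min ((q : Int) + k + 1) (s.length : Int) := by
        rw [hlen] at hq; omega
      exact hc q p h1 h2 h3 (by
        rw [List.getElem?_eq_getElem hplen, List.getElem?_eq_getElem (by omega : q < s.length), hget])
    · have htake : s.take (p + 1) = s.take p := by
        rw [List.take_add_one, List.getElem?_eq_none (by simpa using by omega)]
        simp
      rw [htake]; exact ih (by omega)

theorem bStep_skip (k : Int) (res : List Char) (c : Char)
    (h : c ∈ res.drop (res.length - k.toNat)) : bStep k res c = res := by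
  unfold bStep; exact if_pos h

-- a character equal to one of the last k kept characters is skipped, so erasing it preserves the fold
theorem foldl_bStep_erase (k : Int) (s : List Char) (j : Nat) (hj : j < s.length)
    (hmem : s[j] ∈ ((s.take j).foldl (bStep k) []).drop
      (((s.take j).foldl (bStep k) []).length - k.toNat)) :
    (s.eraseIdx j).foldl (bStep k) [] = s.foldl (bStep k) [] := by
  have h1 : s.eraseIdx j = s.take j ++ s.drop (j + 1) := List.eraseIdx_eq_take_drop_succ s j
  have h2 : s = s.take j ++ s[j] :: s.drop (j + 1) := by
    conv_lhs => rw [← List.take_append_drop j s]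
    rw [List.getElem_cons_drop]
  rw [h1, List.foldl_append]
  conv_rhs => rw [h2]
  rw [List.foldl_append, List.foldl_cons]
  congr 1
  exact (bStep_skip k _ _ hmem).symm

-- the character A pops is one B skips
theorem popped_is_skipped (k : Int) (s : List Char) (i j : Nat) (hc : Clean k s i)
    (hi : i < s.length) (hij : i + 1 ≤ j) (hjk : (j : Int) < min ((i : Int) + k + 1) (s.length : Int)) :
    (s[i]'hi) ∈ ((s.take j).foldl (bStep k) []).drop
      (((s.take j).foldl (bStep k) []).length - k.toNat) := by
  have hjlen : j < s.length := by omega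
  have htj : s.take j = s.take (i + 1) ++ (s.take j).drop (i + 1) := by
    conv_lhs => rw [← List.take_append_drop (i + 1) (s.take j)]
    rw [List.take_take]
    congr 2
    omega
  have hfold1 : (s.take (i + 1)).foldl (bStep k) [] = s.take (i + 1) :=
    foldl_bStep_clean k s i hc (i + 1) (le_refl _)
  obtain ⟨e, he, hle⟩ := foldl_bStep_prefix k ((s.take j).drop (i + 1)) (s.take (i + 1))
  have hstate : (s.take j).foldl (bStep k) [] = s.take (i + 1) ++ e := by
    conv_lhs => rw [htj]
    rw [List.foldl_append, hfold1, he]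
  have hel : e.length ≤ j - (i + 1) := by
    have hd : ((s.take j).drop (i + 1)).length = j - (i + 1) := by simp; omega
    omega
  rw [hstate]
  have hlen1 : (s.take (i + 1)).length = i + 1 := by simp; omega
  have hLlen : (s.take (i + 1) ++ e).length = i + 1 + e.length := by simp [hlen1]
  have hkpos : 1 ≤ k := by omega
  have hm : (s.take (i + 1) ++ e).length - k.toNat ≤ i := by
    rw [hLlen]; omega
  apply List.mem_iff_getElem?.mpr
  refine ⟨i - ((s.take (i + 1) ++ e).length - k.toNat), ?_⟩
  rw [List.getElem?_drop]
  have hmi : (s.take (i + 1) ++ e).length - k.toNat +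
      (i - ((s.take (i + 1) ++ e).length - k.toNat)) = i := by omega
  rw [hmi, List.getElem?_append_left (by omega), List.getElem?_take,
    if_pos (Nat.lt_succ_self i), List.getElem?_eq_getElem hi]

theorem aLoop_eq_foldl (k : Int) (s : List Char) (i : Nat) (hc : Clean k s i)
    (hi : i ≤ s.length) : aLoop k s i = s.foldl (bStep k) [] := by
  fun_induction aLoop k s i with
  | case1 s i h j hf ih =>
    have hmem := scanJ_mem _ _ _ _ hf
    rw [PySem.List.mem_pyRange_one] at hmem
    have heq := scanJ_some_spec _ _ _ _ hf
    have hij : i + 1 ≤ j.toNat := by omega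
    have hjk : (j.toNat : Int) < min ((i : Int) + k + 1) (s.length : Int) := by omega
    have hjlen : j.toNat < s.length := by omega
    have hsij : s[j.toNat]'hjlen = s[i]'h := by
      rw [List.getElem?_eq_getElem hjlen] at heq
      injection heq
    have hskip := popped_is_skipped k s i j.toNat hc h hij hjk
    rw [ih (by intro q j' hq; omega) (by omega)]
    apply foldl_bStep_erase k s j.toNat hjlen
    rw [hsij]
    exact hskip
  | case2 s i h hf ih =>
    apply ih ?_ (by omega)
    intro q j hq hqj hjlt
    rcases Nat.lt_succ_iff_lt_or_eq.mp hq with h' | h'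
    · exact hc q j h' hqj hjlt
    · subst h'
      have hnone := scanJ_none_spec _ _ _ hf (j : Int)
        (by rw [PySem.List.mem_pyRange_one]; omega)
      rw [Int.toNat_natCast] at hnone
      rw [List.getElem?_eq_getElem h]
      exact hnone
  | case3 s i h =>
    have hlen : i = s.length := by omega
    subst hlen
    have hcl := foldl_bStep_clean k s s.length hc s.length (by omega)
    simpa using hcl.symm

-- ===== VERDICT (by name: the statement is the Claim_ definition above) =====
theorem mergeCharacters_spec : Claim_equal_mergeCharacters := by
  intro s k _
  unfold Spec_mergeCharacters mergeCharacters mergeCharacters_alt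
  rw [aLoop_eq_foldl k s.toList 0 (by intro q j hq; omega) (by omega)]
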